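-- pv_equiv track=rewrite | github.com/ItIsUday/google-kickstart | 2021/round-c/smaller_strings.py | smaller_strings_count
-- ===== SOURCE A (Python) =====
-- from math import ceil
--
-- def smaller_strings_count(size, k, string):
--     mid = ceil(size / 2)
--     mod = 10 ** 9 + 7
--
--     count, k_powers = 0, 1
--     for i in range(mid):
--         count += (ord(string[mid - i - 1]) - 97) * k_powers
--         k_powers *= k
--
--     return (count + 1) % mod if string[size // 2 - 1::-1] < string[mid:] else count % mod
-- ===== SOURCE B (Python) =====
-- def _horner_mod(digits, k, mod):
--     count = 0
--     for d in digits: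
--         count = (count * k + d) % mod
--     return count
--
--
-- def smaller_strings_count(size, k, string):
--     mod = 10 ** 9 + 7
--     mid = (size + 1) // 2
--     digits = [ord(string[i]) - 97 for i in range(mid)]
--     bump = 1 if string[size // 2 - 1::-1] < string[mid:] else 0
--     return (_horner_mod(digits, k, mod) + bump) % mod
-- ===== Notes on version B (the rewrite author's own statement) =====
-- stated objective: faster
-- what changed: B replaces A's single fused backward loop (power accumulator k_powers, unreduced big-integer count summed smallest power first) by two staged passes: first extract the prefix digit list in forward order, then a separate Horner helper folds it with reduction mod 1e9+7 at every step, and the smaller-check is added as a 0/1 bump in one final reduced expression instead of two branches.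
import Mathlib
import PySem

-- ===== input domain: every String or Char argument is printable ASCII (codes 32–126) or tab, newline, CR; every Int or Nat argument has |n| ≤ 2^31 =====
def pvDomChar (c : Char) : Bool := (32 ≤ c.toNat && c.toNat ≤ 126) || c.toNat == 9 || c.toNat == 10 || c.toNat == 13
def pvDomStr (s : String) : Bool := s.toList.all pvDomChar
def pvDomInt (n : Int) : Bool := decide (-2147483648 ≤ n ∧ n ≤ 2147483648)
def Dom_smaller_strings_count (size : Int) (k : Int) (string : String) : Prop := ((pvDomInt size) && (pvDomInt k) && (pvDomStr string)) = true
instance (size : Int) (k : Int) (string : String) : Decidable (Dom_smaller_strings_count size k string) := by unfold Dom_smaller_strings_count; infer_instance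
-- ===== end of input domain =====

-- B replaces A's fused backward loop (power accumulator, unreduced big-integer count) by two
-- staged passes: forward digit extraction, then a Horner fold reduced mod 1e9+7 at each step.

-- ===== PORT A =====
-- mid = ceil(size / 2); math.ceil of the float size/2 is exact on |size| ≤ 2^31, and
-- ceil(size/2) = (size + 1) // 2 for every integer size.
def smaller_strings_count (size : Int) (k : Int) (string : String) : Int :=
  let s := string.toList
  let mid := PySem.Int.floordiv (size + 1) 2
  let m : Int := 10 ^ 9 + 7
  -- for i in range(mid): count += (ord(string[mid-i-1]) - 97) * k_powers; k_powers *= k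
  -- string[mid-i-1] raises IndexError iff mid > len(string); Pre_ excludes exactly that,
  -- so pyGetD's default is never used.
  let st := (PySem.List.pyRange 0 mid 1).foldl
      (fun (st : Int × Int) i =>
        (st.1 + (((PySem.List.pyGetD s (mid - i - 1) 'a').toNat : Int) - 97) * st.2, st.2 * k))
      (0, 1)
  -- string[size//2 - 1 :: -1] < string[mid:]; slice? is none only for step 0, so getD [] is safe
  if (PySem.List.slice? s (some (PySem.Int.floordiv size 2 - 1)) none (-1)).getD [] <
      PySem.List.slice s (some mid) none
  then PySem.Int.mod (st.1 + 1) m else PySem.Int.mod st.1 m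

-- ===== PORT B =====
-- helper _horner_mod(digits, k, mod): left fold with per-step reduction, as a structural recursion
def pvHornerModB (k m : Int) : Int → List Int → Int
  | count, [] => count
  | count, d :: rest => pvHornerModB k m (PySem.Int.mod (count * k + d) m) rest

def smaller_strings_count_alt (size : Int) (k : Int) (string : String) : Int :=
  let s := string.toList
  let m : Int := 10 ^ 9 + 7
  let mid := PySem.Int.floordiv (size + 1) 2
  -- digits = [ord(string[i]) - 97 for i in range(mid)]
  -- string[i] raises IndexError iff mid > len(string); Pre_ excludes exactly that.
  let digits := (PySem.List.pyRange 0 mid 1).map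
      (fun i => ((PySem.List.pyGetD s i 'a').toNat : Int) - 97)
  -- bump = 1 if string[size//2 - 1::-1] < string[mid:] else 0
  let bump : Int :=
    if (PySem.List.slice? s (some (PySem.Int.floordiv size 2 - 1)) none (-1)).getD [] <
        PySem.List.slice s (some mid) none
    then 1 else 0
  PySem.Int.mod (pvHornerModB k m 0 digits + bump) m

-- ===== PRECONDITION & SPEC =====
-- Exactly the inputs on which A returns: A raises IndexError iff ceil(size/2) > len(string)
-- (the loop then reads string[mid-1]); slices never raise.  B raises on the same inputs.
def Pre_smaller_strings_count (size : Int) (k : Int) (string : String) : Prop :=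
  PySem.Int.floordiv (size + 1) 2 ≤ (string.toList.length : Int)
instance (size : Int) (k : Int) (string : String) : Decidable (Pre_smaller_strings_count size k string) := by unfold Pre_smaller_strings_count; infer_instance

def pvWitness_smaller_strings_count : Int × Int × String := (4, 3, "abca")

def Spec_smaller_strings_count (size : Int) (k : Int) (string : String) (out : Int) : Prop := out = smaller_strings_count_alt size k string
instance (size : Int) (k : Int) (string : String) (out : Int) : Decidable (Spec_smaller_strings_count size k string out) := by unfold Spec_smaller_strings_count; infer_instance

-- ===== CLAIM (what is proved, stated in full; the proofs are below) =====
def Claim_equal_smaller_strings_count : Prop := ∀ (size : Int) (k : Int) (string : String), Dom_smaller_strings_count size k string → Pre_smaller_strings_count size k string → Spec_smaller_strings_count size k string (smaller_strings_count size k string)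

-- ===== LEMMAS AND PROOFS =====

-- the pair loop of A: starting from (c, p), folding the digit list l adds p * (Σ l_i k^i) to c
theorem pvA_pairfold (k : Int) (l : List Int) (c p : Int) :
    (l.foldl (fun (st : Int × Int) x => (st.1 + x * st.2, st.2 * k)) (c, p)).1
      = c + p * l.foldr (fun x acc => x + acc * k) 0 := by
  induction l generalizing c p with
  | nil => simp
  | cons x t ih => simp [List.foldl_cons, ih]; ring

-- A's pair fold over range(mid) with backward access = forward plain Horner of the digit list
theorem pvA_eq_horner (k : Int) (s : List Char) (M : Nat) (hMn : M ≤ s.length) :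
    ((PySem.List.pyRange 0 (M : Int) 1).foldl
      (fun (st : Int × Int) i =>
        (st.1 + (((PySem.List.pyGetD s ((M : Int) - i - 1) 'a').toNat : Int) - 97) * st.2,
          st.2 * k)) (0, 1)).1
    = ((s.take M).map (fun c => ((c.toNat : Int) - 97))).foldl (fun x y => x * k + y) 0 := by
  have hmap : (PySem.List.pyRange 0 (M : Int) 1).map
      (fun i => (((PySem.List.pyGetD s ((M : Int) - i - 1) 'a').toNat : Int) - 97))
      = ((s.take M).map (fun c => ((c.toNat : Int) - 97))).reverse := by
    apply List.ext_getElem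
    · simp [PySem.List.length_pyRange_one]
      omega
    · intro i h1 h2
      have hi : i < M := by
        simpa [PySem.List.length_pyRange_one] using h1
      have hidx : (M : Int) - (0 + (i : Int)) - 1 = ((M - 1 - i : Nat) : Int) := by
        omega
      rw [List.getElem_map, PySem.List.getElem_pyRange_one, hidx, PySem.List.pyGetD_natCast,
        List.getD_eq_getElem _ _ (by omega), List.getElem_reverse, List.getElem_map,
        List.getElem_take]
      simp only [List.length_map, List.length_take, Nat.min_eq_left hMn]
  rw [← List.foldl_map
    (f := fun i => (((PySem.List.pyGetD s ((M : Int) - i - 1) 'a').toNat : Int) - 97))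
    (g := fun (st : Int × Int) x => (st.1 + x * st.2, st.2 * k)), hmap, pvA_pairfold,
    List.foldr_reverse,
    show (fun (x y : Int) => y + x * k) = (fun x y => x * k + y) from by funext a b; ring]
  ring

-- B's digit list over range(mid) is the mapped prefix of the string
theorem pvB_digits (s : List Char) (M : Nat) (hMn : M ≤ s.length) :
    (PySem.List.pyRange 0 (M : Int) 1).map
      (fun i => ((PySem.List.pyGetD s i 'a').toNat : Int) - 97)
      = (s.take M).map (fun c => ((c.toNat : Int) - 97)) := by
  apply List.ext_getElem
  · simp [PySem.List.length_pyRange_one]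
    omega
  · intro i h1 h2
    have hi : i < M := by
      simpa [PySem.List.length_pyRange_one] using h1
    rw [List.getElem_map, PySem.List.getElem_pyRange_one,
      show (0 : Int) + (i : Nat) = ((i : Nat) : Int) from by omega, PySem.List.pyGetD_natCast,
      List.getD_eq_getElem _ _ (by omega), List.getElem_map, List.getElem_take]

-- B's per-step-reduced Horner recursion = plain Horner, reduced once (for positive m)
theorem pvHornerModB_eq (k : Int) (l : List Int) (a b : Int) (h : b = a % (10 ^ 9 + 7)) :
    pvHornerModB k (10 ^ 9 + 7) b l = (l.foldl (fun x y => x * k + y) a) % (10 ^ 9 + 7) := by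
  induction l generalizing a b with
  | nil => simpa using h
  | cons d t ih =>
      simp only [pvHornerModB, List.foldl_cons]
      refine ih _ _ ?_
      rw [PySem.Int.mod_eq_emod_of_pos (by norm_num), h]
      exact Int.ModEq.add_right d (Int.ModEq.mul_right k (Int.emod_emod_of_dvd a dvd_rfl))

-- ===== VERDICT (by name: the statement is the Claim_ definition above) =====
theorem smaller_strings_count_spec : Claim_equal_smaller_strings_count := by
  intro size k string _ hpre
  unfold Pre_smaller_strings_count at hpre
  unfold Spec_smaller_strings_count
  simp only [smaller_strings_count, smaller_strings_count_alt]
  revert hpre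
  generalize string.toList = s
  generalize PySem.Int.floordiv (size + 1) 2 = mid
  intro hpre
  have hm : (0 : Int) < 10 ^ 9 + 7 := by norm_num
  by_cases h0 : 0 ≤ mid
  · obtain ⟨M, rfl⟩ : ∃ M : Nat, mid = (M : Int) :=
      ⟨mid.toNat, (Int.toNat_of_nonneg h0).symm⟩
    have hMn : M ≤ s.length := by exact_mod_cast hpre
    rw [pvA_eq_horner k s M hMn, pvB_digits s M hMn,
      pvHornerModB_eq k _ 0 0 (by simp)]
    set H := ((s.take M).map (fun c => ((c.toNat : Int) - 97))).foldl
        (fun x y => x * k + y) 0 with hH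
    by_cases hc : (PySem.List.slice? s (some (PySem.Int.floordiv size 2 - 1)) none (-1)).getD []
        < PySem.List.slice s (some ((M : Nat) : Int)) none
    · rw [if_pos hc, if_pos hc, PySem.Int.mod_eq_emod_of_pos hm,
        PySem.Int.mod_eq_emod_of_pos hm]
      exact (Int.ModEq.add_right 1 (Int.emod_emod_of_dvd _ dvd_rfl)).symm
    · rw [if_neg hc, if_neg hc, PySem.Int.mod_eq_emod_of_pos hm,
        PySem.Int.mod_eq_emod_of_pos hm, add_zero, Int.emod_emod_of_dvd _ dvd_rfl]
  · have hnil : PySem.List.pyRange 0 mid 1 = [] :=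
      List.eq_nil_of_length_eq_zero (by rw [PySem.List.length_pyRange_one]; omega)
    rw [hnil]
    simp only [List.foldl_nil, List.map_nil, pvHornerModB]
    by_cases hc : (PySem.List.slice? s (some (PySem.Int.floordiv size 2 - 1)) none (-1)).getD []
        < PySem.List.slice s (some mid) none
    · rw [if_pos hc, if_pos hc]
    · rw [if_neg hc, if_neg hc, add_zero]
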